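-- pv_equiv track=rewrite | github.com/YiweiHan/advent-of-code | 2021/day22/day22.py | proc_x
-- ===== SOURCE A (Python) =====
-- from itertools import pairwise
--
-- def step_in_bounds(s, dim, dim_end, idx):
--     return s[idx[0]] <= dim <= s[idx[1]] or s[idx[0]] <= dim_end <= s[idx[1]]
--
-- def filter_steps(steps, dim, dim_end, idx):
--     return [s for s in steps if step_in_bounds(s, dim, dim_end, idx)]
--
-- def proc_x(args):
--     all_y, all_z, rev_steps, x, x_end = args
--     count = 0
--     filtered_steps_x = filter_steps(rev_steps, x, x_end-1, (1, 2))
--     for y, y_end in pairwise(all_y):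
--         filtered_steps_y = filter_steps(filtered_steps_x, y, y_end-1, (3, 4))
--         for z, z_end in pairwise(all_z):
--             filtered_steps_z = filter_steps(filtered_steps_y, z, z_end-1, (5, 6))
--             if filtered_steps_z and filtered_steps_z[0][0]:
--                 count += (x_end - x) * (y_end - y) * (z_end - z)
--     return count
-- ===== SOURCE B (Python) =====
-- def proc_x(args):
--     all_y, all_z, rev_steps, x, x_end = args
--     xe = x_end - 1
--     y_slabs = list(enumerate(zip(all_y, all_y[1:])))
--     z_slabs = list(enumerate(zip(all_z, all_z[1:])))
--     # paint the (y,z) cell grid back-to-front: earlier steps overwrite later ones,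
--     # so each cell ends holding the on/off value of its topmost covering step
--     grid = {}
--     for s in reversed(rev_steps):
--         if s[1] <= x <= s[2] or s[1] <= xe <= s[2]:
--             for iy, (y, y_end) in y_slabs:
--                 if s[3] <= y <= s[4] or s[3] <= y_end - 1 <= s[4]:
--                     for iz, (z, z_end) in z_slabs:
--                         if s[5] <= z <= s[6] or s[5] <= z_end - 1 <= s[6]:
--                             grid[(iy, iz)] = s[0]
--     count = 0
--     for iy, (y, y_end) in y_slabs:
--         for iz, (z, z_end) in z_slabs:
--             if grid.get((iy, iz)):
--                 count += (x_end - x) * (y_end - y) * (z_end - z)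
--     return count
-- ===== Notes on version B (the rewrite author's own statement) =====
-- stated objective: faster
-- what changed: Instead of re-filtering the step list per x-slab, per y-slab and again per (y,z) cell and reading the head of the surviving list, B paints a dict over (y,z) cell indices by iterating the steps once in reverse order so earlier (topmost) steps overwrite later ones, then sums the volumes of cells whose stored on/off value is truthy.
import Mathlib
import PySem

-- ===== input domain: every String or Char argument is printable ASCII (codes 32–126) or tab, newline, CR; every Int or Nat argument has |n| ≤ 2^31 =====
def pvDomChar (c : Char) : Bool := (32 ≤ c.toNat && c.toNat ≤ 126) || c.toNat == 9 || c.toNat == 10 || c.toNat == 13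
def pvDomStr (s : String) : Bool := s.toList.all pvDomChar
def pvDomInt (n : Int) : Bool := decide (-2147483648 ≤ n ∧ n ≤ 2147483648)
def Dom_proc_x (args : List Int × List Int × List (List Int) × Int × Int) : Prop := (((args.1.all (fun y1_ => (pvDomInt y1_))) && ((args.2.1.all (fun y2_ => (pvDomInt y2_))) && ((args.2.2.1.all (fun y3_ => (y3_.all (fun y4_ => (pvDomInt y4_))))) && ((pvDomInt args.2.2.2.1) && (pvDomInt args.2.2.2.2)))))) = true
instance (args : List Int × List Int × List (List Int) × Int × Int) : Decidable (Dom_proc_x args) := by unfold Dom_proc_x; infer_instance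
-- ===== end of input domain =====

-- B replaces A's per-cell rescans of the step list by painting the (y,z)-cell grid once,
-- back-to-front over the steps, so each cell ends holding its topmost covering step's on/off
-- value (return-value equivalence on step rows of length ≥ 7, where A raises no IndexError).

-- step field i (0 ≤ i ≤ 6); default 0 is never used under Pre_ (rows have length ≥ 7)
def pyG (s : List Int) (i : Int) : Int := PySem.List.pyGetD s i 0

-- ===== PORT A =====
def step_in_bounds (s : List Int) (dim dimEnd : Int) (i j : Int) : Bool :=
  (decide (pyG s i ≤ dim) && decide (dim ≤ pyG s j)) ||
  (decide (pyG s i ≤ dimEnd) && decide (dimEnd ≤ pyG s j))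

def filter_steps (steps : List (List Int)) (dim dimEnd : Int) (i j : Int) : List (List Int) :=
  steps.filter (fun s => step_in_bounds s dim dimEnd i j)

def proc_x (args : List Int × List Int × List (List Int) × Int × Int) : Int :=
  let all_y := args.1
  let all_z := args.2.1
  let rev_steps := args.2.2.1
  let x := args.2.2.2.1
  let x_end := args.2.2.2.2
  let filtered_steps_x := filter_steps rev_steps x (x_end - 1) 1 2
  (all_y.zip all_y.tail).foldl (fun count yp =>
    let filtered_steps_y := filter_steps filtered_steps_x yp.1 (yp.2 - 1) 3 4
    (all_z.zip all_z.tail).foldl (fun count zp =>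
      let filtered_steps_z := filter_steps filtered_steps_y zp.1 (zp.2 - 1) 5 6
      if (match filtered_steps_z.head? with
          | some s => pyG s 0 != 0
          | none => false) then
        count + (x_end - x) * (yp.2 - yp.1) * (zp.2 - zp.1)
      else count) count) 0

-- ===== PORT B =====
def proc_x_alt (args : List Int × List Int × List (List Int) × Int × Int) : Int :=
  let all_y := args.1
  let all_z := args.2.1
  let rev_steps := args.2.2.1
  let x := args.2.2.2.1
  let x_end := args.2.2.2.2
  let xe := x_end - 1
  let y_slabs := PySem.List.enumerate (all_y.zip (all_y.drop 1)) 0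
  let z_slabs := PySem.List.enumerate (all_z.zip (all_z.drop 1)) 0
  let grid : PySem.Dict (Int × Int) Int :=
    rev_steps.reverse.foldl (fun d s =>
      if (decide (pyG s 1 ≤ x) && decide (x ≤ pyG s 2)) ||
         (decide (pyG s 1 ≤ xe) && decide (xe ≤ pyG s 2)) then
        y_slabs.foldl (fun d iyp =>
          if (decide (pyG s 3 ≤ iyp.2.1) && decide (iyp.2.1 ≤ pyG s 4)) ||
             (decide (pyG s 3 ≤ iyp.2.2 - 1) && decide (iyp.2.2 - 1 ≤ pyG s 4)) then
            z_slabs.foldl (fun d izp =>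
              if (decide (pyG s 5 ≤ izp.2.1) && decide (izp.2.1 ≤ pyG s 6)) ||
                 (decide (pyG s 5 ≤ izp.2.2 - 1) && decide (izp.2.2 - 1 ≤ pyG s 6)) then
                d.insert (iyp.1, izp.1) (pyG s 0)
              else d) d
          else d) d
      else d) PySem.Dict.empty
  y_slabs.foldl (fun count iyp =>
    z_slabs.foldl (fun count izp =>
      if (match grid.get? (iyp.1, izp.1) with
          | some v => v != 0
          | none => false) then
        count + (x_end - x) * (iyp.2.2 - iyp.2.1) * (izp.2.2 - izp.2.1)
      else count) count) 0

-- ===== PRECONDITION & SPEC =====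
-- pvRaisesIB: Python's `s[i] <= dim <= s[j] or s[i] <= dim_end <= s[j]` raises IndexError
-- (short-circuit: s[j] is only reached when s[i] <= dim or s[i] <= dim_end holds)
def pvRaisesIB (s : List Int) (dim dimEnd : Int) (i j : Int) : Prop :=
  (s.length : Int) ≤ i ∨ ((s.length : Int) ≤ j ∧ (pyG s i ≤ dim ∨ pyG s i ≤ dimEnd))
-- pvInB: the value of that test when it does not raise (then the default-0 reads are unreachable)
def pvInB (s : List Int) (dim dimEnd : Int) (i j : Int) : Bool :=
  (decide (pyG s i ≤ dim) && decide (dim ≤ pyG s j)) ||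
  (decide (pyG s i ≤ dimEnd) && decide (dimEnd ≤ pyG s j))

-- Pre_ excludes exactly the inputs on which A raises IndexError: some step row is too short
-- for a bounds test that the filter cascade actually evaluates on it.
def Pre_proc_x (args : List Int × List Int × List (List Int) × Int × Int) : Prop :=
  ∀ s ∈ args.2.2.1,
    ¬ pvRaisesIB s args.2.2.2.1 (args.2.2.2.2 - 1) 1 2 ∧
    (pvInB s args.2.2.2.1 (args.2.2.2.2 - 1) 1 2 = true →
      ∀ yp ∈ args.1.zip args.1.tail,
        ¬ pvRaisesIB s yp.1 (yp.2 - 1) 3 4 ∧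
        (pvInB s yp.1 (yp.2 - 1) 3 4 = true →
          ∀ zp ∈ args.2.1.zip args.2.1.tail, ¬ pvRaisesIB s zp.1 (zp.2 - 1) 5 6))
instance (args : List Int × List Int × List (List Int) × Int × Int) : Decidable (Pre_proc_x args) := by unfold Pre_proc_x pvRaisesIB pvInB; infer_instance

def pvWitness_proc_x : (List Int × List Int × List (List Int) × Int × Int) :=
  ([0, 2, 3], [0, 2], [[1, 0, 1, 0, 4, 0, 4], [0, 0, 9, 0, 9, 0, 9]], 0, 1)

def Spec_proc_x (args : List Int × List Int × List (List Int) × Int × Int) (out : Int) : Prop := out = proc_x_alt args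
instance (args : List Int × List Int × List (List Int) × Int × Int) (out : Int) : Decidable (Spec_proc_x args out) := by unfold Spec_proc_x; infer_instance

-- ===== CLAIM (what is proved, stated in full; the proofs are below) =====
def Claim_equal_proc_x : Prop := ∀ (args : List Int × List Int × List (List Int) × Int × Int), Dom_proc_x args → Pre_proc_x args → Spec_proc_x args (proc_x args)

-- ===== LEMMAS AND PROOFS =====


-- common form of both counts: per (y,z) cell, test the head of one fused filter of the steps
def commonCount (ay az : List Int) (steps : List (List Int)) (x xend : Int) : Int :=
  (ay.zip ay.tail).foldl (fun count yp =>
    (az.zip az.tail).foldl (fun count zp =>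
      if (match (steps.filter (fun s =>
            ((decide (pyG s 5 ≤ zp.1) && decide (zp.1 ≤ pyG s 6)) ||
             (decide (pyG s 5 ≤ zp.2 - 1) && decide (zp.2 - 1 ≤ pyG s 6))) &&
            (((decide (pyG s 3 ≤ yp.1) && decide (yp.1 ≤ pyG s 4)) ||
              (decide (pyG s 3 ≤ yp.2 - 1) && decide (yp.2 - 1 ≤ pyG s 4))) &&
             ((decide (pyG s 1 ≤ x) && decide (x ≤ pyG s 2)) ||
              (decide (pyG s 1 ≤ xend - 1) && decide (xend - 1 ≤ pyG s 2)))))).head? with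
          | some s => pyG s 0 != 0
          | none => false) then
        count + (xend - x) * (yp.2 - yp.1) * (zp.2 - zp.1)
      else count) count) 0


theorem zwrite_get? (Z : List (Int × (Int × Int))) (zc : (Int × Int) → Bool) (iy i j v : Int)
    (d : PySem.Dict (Int × Int) Int) :
    (Z.foldl (fun d izp => if zc izp.2 then d.insert (iy, izp.1) v else d) d).get? (i, j)
    = if iy = i ∧ Z.any (fun izp => izp.1 == j && zc izp.2) then some v else d.get? (i, j) := by
  induction Z generalizing d with
  | nil => simp
  | cons a t ih =>
    simp only [List.foldl_cons, ih, List.any_cons]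
    by_cases h1 : iy = i <;> by_cases h2 : (t.any fun izp => izp.1 == j && zc izp.2) = true <;>
      by_cases h3 : zc a.2 = true <;> by_cases h4 : a.1 = j <;>
      simp [h1, h2, h3, h4, PySem.Dict.get?_insert, Prod.ext_iff] <;> intros <;> simp_all

theorem ywrite_get? (Y Z : List (Int × (Int × Int))) (yc zc : (Int × Int) → Bool) (i j v : Int)
    (d : PySem.Dict (Int × Int) Int) :
    (Y.foldl (fun d iyp =>
        if yc iyp.2 then
          Z.foldl (fun d izp => if zc izp.2 then d.insert (iyp.1, izp.1) v else d) d
        else d) d).get? (i, j)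
    = if (Y.any fun iyp => iyp.1 == i && yc iyp.2) ∧ (Z.any fun izp => izp.1 == j && zc izp.2)
      then some v else d.get? (i, j) := by
  induction Y generalizing d with
  | nil => simp
  | cons a t ih =>
    simp only [List.foldl_cons, ih, List.any_cons]
    by_cases h1 : (t.any fun iyp => iyp.1 == i && yc iyp.2) = true <;>
      by_cases h2 : (Z.any fun izp => izp.1 == j && zc izp.2) = true <;>
      by_cases h3 : yc a.2 = true <;> by_cases h4 : a.1 = i <;>
      simp [h1, h2, h3, h4, zwrite_get?]

theorem grid_get? (t : List (List Int)) (xc : List Int → Bool) (yc zc : List Int → (Int × Int) → Bool)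
    (Y Z : List (Int × (Int × Int))) (i j : Int) (val : List Int → Int) :
    (t.foldr (fun s d =>
        if xc s then
          Y.foldl (fun d iyp =>
            if yc s iyp.2 then
              Z.foldl (fun d izp => if zc s izp.2 then d.insert (iyp.1, izp.1) (val s) else d) d
            else d) d
        else d) PySem.Dict.empty).get? (i, j)
    = (t.filter (fun s => (Z.any fun izp => izp.1 == j && zc s izp.2) &&
        ((Y.any fun iyp => iyp.1 == i && yc s iyp.2) && xc s))).head?.map val := by
  induction t with
  | nil => simp [PySem.Dict.empty, PySem.Dict.get?]
  | cons s t ih =>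
    simp only [List.foldr_cons, List.filter_cons]
    by_cases hx : xc s = true
    · rw [if_pos hx, ywrite_get?]
      by_cases h1 : (Y.any fun iyp => iyp.1 == i && yc s iyp.2) = true <;>
        by_cases h2 : (Z.any fun izp => izp.1 == j && zc s izp.2) = true <;>
        simp [hx, h1, h2, ih]
    · simp [hx, ih]

theorem any_enumerate_eq (P : List (Int × Int)) (k : Int) (a : Int × Int)
    (h : (k, a) ∈ PySem.List.enumerate P 0) (c : (Int × Int) → Bool) :
    ((PySem.List.enumerate P 0).any fun p => p.1 == k && c p.2) = c a := by
  rw [PySem.List.mem_enumerate_iff] at h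
  obtain ⟨m, hm, hma⟩ := h
  simp only [Prod.ext_iff] at hma
  have hk : k = 0 + (m:Int) := hma.1
  have haP : a = P[m] := Prod.ext hma.2.1 hma.2.2
  rw [Bool.eq_iff_iff, List.any_eq_true]
  constructor
  · rintro ⟨p, hp, hpk⟩
    rw [PySem.List.mem_enumerate_iff] at hp
    obtain ⟨n, hn, rfl⟩ := hp
    simp only [Bool.and_eq_true, beq_iff_eq] at hpk
    have hnm : n = m := by omega
    subst hnm
    rw [haP]
    exact hpk.2
  · intro hc
    refine ⟨(k, a), ?_, by simp [hc]⟩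
    rw [PySem.List.mem_enumerate_iff]
    exact ⟨m, hm, by simp [hk, haP]⟩


theorem foldl_enumerate_snd (P : List (Int × Int)) (H : Int → (Int × Int) → Int) (init : Int) :
    (PySem.List.enumerate P 0).foldl (fun c p => H c p.2) init = P.foldl H init := by
  conv_rhs => rw [← PySem.List.map_snd_enumerate (xs := P) (s := 0)]
  rw [List.foldl_map]

theorem A_eq (ay az : List Int) (steps : List (List Int)) (x xend : Int) :
    proc_x (ay, az, steps, x, xend) = commonCount ay az steps x xend := by
  simp only [proc_x, filter_steps, step_in_bounds, List.filter_filter, commonCount]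

theorem B_eq (ay az : List Int) (steps : List (List Int)) (x xend : Int) :
    proc_x_alt (ay, az, steps, x, xend) = commonCount ay az steps x xend := by
  simp only [proc_x_alt, List.drop_one, List.foldl_reverse, commonCount]
  rw [← foldl_enumerate_snd]
  apply PySem.List.foldl_congr_mem
  intro c iyp hy
  rw [← foldl_enumerate_snd]
  apply PySem.List.foldl_congr_mem
  intro c2 izp hz
  rw [grid_get? steps
    (fun s => (decide (pyG s 1 ≤ x) && decide (x ≤ pyG s 2)) ||
              (decide (pyG s 1 ≤ xend - 1) && decide (xend - 1 ≤ pyG s 2)))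
    (fun s p => (decide (pyG s 3 ≤ p.1) && decide (p.1 ≤ pyG s 4)) ||
                (decide (pyG s 3 ≤ p.2 - 1) && decide (p.2 - 1 ≤ pyG s 4)))
    (fun s p => (decide (pyG s 5 ≤ p.1) && decide (p.1 ≤ pyG s 6)) ||
                (decide (pyG s 5 ≤ p.2 - 1) && decide (p.2 - 1 ≤ pyG s 6)))
    (PySem.List.enumerate (ay.zip ay.tail) 0) (PySem.List.enumerate (az.zip az.tail) 0)
    iyp.1 izp.1 (fun s => pyG s 0)]
  rw [List.filter_congr (fun s _ => by
    rw [any_enumerate_eq (az.zip az.tail) izp.1 izp.2 (by simpa using hz)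
          (fun p => (decide (pyG s 5 ≤ p.1) && decide (p.1 ≤ pyG s 6)) ||
                    (decide (pyG s 5 ≤ p.2 - 1) && decide (p.2 - 1 ≤ pyG s 6))),
        any_enumerate_eq (ay.zip ay.tail) iyp.1 iyp.2 (by simpa using hy)
          (fun p => (decide (pyG s 3 ≤ p.1) && decide (p.1 ≤ pyG s 4)) ||
                    (decide (pyG s 3 ≤ p.2 - 1) && decide (p.2 - 1 ≤ pyG s 4)))])]
  cases (steps.filter _).head? <;> simp

theorem proc_eq (args : List Int × List Int × List (List Int) × Int × Int) :
    proc_x args = proc_x_alt args := by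
  obtain ⟨ay, az, steps, x, xend⟩ := args
  rw [A_eq, B_eq]


-- ===== VERDICT (by name: the statement is the Claim_ definition above) =====
theorem proc_x_spec : Claim_equal_proc_x := by
  intro args _ _
  unfold Spec_proc_x
  exact proc_eq args
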